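-- pv_equiv track=rewrite | github.com/edggoncalves/aocd | 2024/2/day_two.py | part_one
-- ===== SOURCE A (Python) =====
-- class Tests:
--     def __init__(self, line: list[int], tolerance: int = 0):
--         self.line = line
--         self.increasing = self.is_increasing()
--         self.decreasing = self.is_decreasing()
--         self.safe = self.safe_difference()
--
--     def is_increasing(self) -> bool:
--         for i in range(len(self.line)-1):
--             if self.line[i] > self.line[i+1]:
--                 return False
--         return True
--
--     def is_decreasing(self) -> bool:
--         for i in range(len(self.line)-1):
--             if self.line[i] < self.line[i+1]:
--                 return False
--         return True
--
--     def safe_difference(self) -> bool: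
--         for i in range(len(self.line)-1):
--             val = abs(self.line[i] - self.line[i+1])
--             if val > 3 or val == 0:
--                 return False
--         return True
--
-- def part_one(input_data: list[str]) -> int:
--     input_data = [[int(number) for number in line.split()] for line in input_data]
--     result = 0
--
--     for line in input_data:
--         test = Tests(line)
--         if any([test.increasing, test.decreasing]) and test.safe:
--             result += 1
--     return result
-- ===== SOURCE B (Python) =====
-- def part_one(input_data: list[str]) -> int:
--     safe_steps = ({1, 2, 3}, {-1, -2, -3})
--     total = 0
--     for line in input_data:
--         nums = [int(x) for x in line.split()]
--         steps = {b - a for a, b in zip(nums, nums[1:])}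
--         total += any(steps <= allowed for allowed in safe_steps)
--     return total
-- ===== Notes on version B (the rewrite author's own statement) =====
-- stated objective: alternative
-- what changed: B replaces A's Tests class with its three separate pairwise index-scans (increasing, decreasing, bounded difference) by computing the SET of distinct adjacent step values per line and testing it for subset-inclusion in one of the two constant allowed-step sets {1,2,3} / {-1,-2,-3}.
import Mathlib
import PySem

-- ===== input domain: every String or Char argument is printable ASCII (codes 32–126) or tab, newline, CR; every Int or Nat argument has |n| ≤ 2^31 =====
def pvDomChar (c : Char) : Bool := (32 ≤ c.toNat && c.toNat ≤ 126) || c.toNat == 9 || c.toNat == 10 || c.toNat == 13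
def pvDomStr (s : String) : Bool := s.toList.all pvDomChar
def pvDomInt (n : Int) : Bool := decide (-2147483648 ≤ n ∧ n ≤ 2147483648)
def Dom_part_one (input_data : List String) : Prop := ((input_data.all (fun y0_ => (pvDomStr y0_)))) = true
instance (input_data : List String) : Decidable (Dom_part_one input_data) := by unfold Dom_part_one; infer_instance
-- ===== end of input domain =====

-- B replaces A's three pairwise index-scans by the set of distinct adjacent steps per line,
-- tested for subset-inclusion in {1,2,3} or {-1,-2,-3}; objective: alternative. Equal returns on Pre_.

-- ===== PORT A =====
-- Tests.is_increasing: index loop over consecutive pairs, early return False on a descent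
def pvIsIncreasing : List Int → Bool
  | a :: b :: t => if a > b then false else pvIsIncreasing (b :: t)
  | _ => true

-- Tests.is_decreasing
def pvIsDecreasing : List Int → Bool
  | a :: b :: t => if a < b then false else pvIsDecreasing (b :: t)
  | _ => true

-- Tests.safe_difference
def pvSafeDifference : List Int → Bool
  | a :: b :: t =>
      let val := |a - b|
      if val > 3 ∨ val = 0 then false else pvSafeDifference (b :: t)
  | _ => true

-- int(number) for number in line.split(); Pre_ guarantees every token parses (getD unreachable)
def pvParseLine (line : String) : List Int :=
  (PySem.Str.split₀ line).map (fun number => (PySem.Int.ofStr? number).getD 0)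

def part_one (input_data : List String) : Int :=
  let parsed := input_data.map pvParseLine
  parsed.foldl
    (fun result line =>
      if (pvIsIncreasing line || pvIsDecreasing line) && pvSafeDifference line then result + 1
      else result) 0

-- ===== PORT B =====
-- B: steps = {b - a for a, b in zip(nums, nums[1:])}; any(steps <= allowed for allowed in safe_steps)
def pvSafeSteps : List (PySem.Set Int) :=
  [PySem.Set.ofList [1, 2, 3], PySem.Set.ofList [-1, -2, -3]]

def part_one_alt (input_data : List String) : Int :=
  input_data.foldl
    (fun total line =>
      let nums := (PySem.Str.split₀ line).map (fun x => (PySem.Int.ofStr? x).getD 0)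
      let steps : PySem.Set Int :=
        PySem.Set.ofList ((nums.zip nums.tail).map (fun p => p.2 - p.1))
      total + (if pvSafeSteps.any (fun allowed => PySem.Set.issubset steps allowed) then 1 else 0))
    0

-- ===== PRECONDITION & SPEC =====
-- Pre_ excludes exactly the inputs where int(token) raises ValueError on some whitespace-split token
def Pre_part_one (input_data : List String) : Prop :=
  (input_data.all (fun line =>
    (PySem.Str.split₀ line).all (fun t => (PySem.Int.ofStr? t).isSome))) = true
instance (input_data : List String) : Decidable (Pre_part_one input_data) := by
  unfold Pre_part_one; infer_instance

def pvWitness_part_one : List String := ["1 2 3", "9 6 3", "1 5"]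

def Spec_part_one (input_data : List String) (out : Int) : Prop := out = part_one_alt input_data
instance (input_data : List String) (out : Int) : Decidable (Spec_part_one input_data out) := by
  unfold Spec_part_one; infer_instance

-- ===== CLAIM (what is proved, stated in full; the proofs are below) =====
def Claim_equal_part_one : Prop := ∀ (input_data : List String), Dom_part_one input_data → Pre_part_one input_data → Spec_part_one input_data (part_one input_data)

-- ===== LEMMAS AND PROOFS =====

lemma pvIsIncreasing_iff (l : List Int) :
    pvIsIncreasing l = true ↔ l.IsChain (· ≤ ·) := by
  induction l with
  | nil => simp [pvIsIncreasing]
  | cons a t ih =>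
    cases t with
    | nil => simp [pvIsIncreasing]
    | cons b t' =>
      simp only [pvIsIncreasing, List.isChain_cons_cons, ← ih]
      by_cases h : a > b <;> simp [h] <;> omega

lemma pvIsDecreasing_iff (l : List Int) :
    pvIsDecreasing l = true ↔ l.IsChain (· ≥ ·) := by
  induction l with
  | nil => simp [pvIsDecreasing]
  | cons a t ih =>
    cases t with
    | nil => simp [pvIsDecreasing]
    | cons b t' =>
      simp only [pvIsDecreasing, List.isChain_cons_cons, ← ih]
      by_cases h : a < b <;> simp [h] <;> omega

lemma pvSafeDifference_iff (l : List Int) :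
    pvSafeDifference l = true ↔ l.IsChain (fun a b => 1 ≤ |a - b| ∧ |a - b| ≤ 3) := by
  induction l with
  | nil => simp [pvSafeDifference]
  | cons a t ih =>
    cases t with
    | nil => simp [pvSafeDifference]
    | cons b t' =>
      simp only [pvSafeDifference, List.isChain_cons_cons, ← ih]
      by_cases h : |a - b| > 3 ∨ |a - b| = 0 <;> simp [h] <;>
        rcases abs_cases (a - b) with ⟨he, _⟩ | ⟨he, _⟩ <;> omega

-- ∀ over the zipped diff list ↔ a chain property on the original list
lemma pvDiffs_forall_iff (P : Int → Prop) (l : List Int) :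
    (∀ d ∈ (l.zip l.tail).map (fun p : Int × Int => p.2 - p.1), P d)
      ↔ l.IsChain (fun a b => P (b - a)) := by
  induction l with
  | nil => simp
  | cons a t ih =>
    cases t with
    | nil => simp
    | cons b t' =>
      simp only [List.tail_cons, List.zip_cons_cons, List.map_cons, List.mem_cons,
        List.isChain_cons_cons, ← ih]
      constructor
      · exact fun h => ⟨h _ (Or.inl rfl), fun d hd => h d (Or.inr hd)⟩
      · rintro ⟨h1, h2⟩ d (rfl | hd)
        · exact h1
        · exact h2 d hd

lemma pvIsChain_and {α : Type} (P Q : α → α → Prop) (l : List α)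
    (hP : l.IsChain P) (hQ : l.IsChain Q) : l.IsChain (fun a b => P a b ∧ Q a b) := by
  induction l with
  | nil => simp
  | cons a t ih =>
    cases t with
    | nil => simp
    | cons b t' =>
      rw [List.isChain_cons_cons] at hP hQ ⊢
      exact ⟨⟨hP.1, hQ.1⟩, ih hP.2 hQ.2⟩

-- A's combined test equals B's subset test, per line
lemma pvCond_eq (l : List Int) :
    ((pvIsIncreasing l || pvIsDecreasing l) && pvSafeDifference l)
      = pvSafeSteps.any (fun allowed =>
          PySem.Set.issubset (PySem.Set.ofList ((l.zip l.tail).map (fun p => p.2 - p.1))) allowed) := by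
  apply Bool.coe_iff_coe.mp
  simp only [pvSafeSteps, List.any_cons, List.any_nil, Bool.or_false, Bool.or_eq_true,
    Bool.and_eq_true, PySem.Set.issubset_iff, PySem.Set.mem_ofList,
    pvIsIncreasing_iff, pvIsDecreasing_iff, pvSafeDifference_iff, pvDiffs_forall_iff,
    List.mem_cons, List.not_mem_nil, or_false]
  constructor
  · rintro ⟨hmono, hsafe⟩
    rcases hmono with h | h
    · refine Or.inl ?_
      have := pvIsChain_and _ _ _ h hsafe
      exact this.imp (fun a b hab => by
        rcases abs_cases (a - b) with ⟨he, _⟩ | ⟨he, _⟩ <;> omega)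
    · refine Or.inr ?_
      have := pvIsChain_and _ _ _ h hsafe
      exact this.imp (fun a b hab => by
        rcases abs_cases (a - b) with ⟨he, _⟩ | ⟨he, _⟩ <;> omega)
  · rintro (h | h)
    · exact ⟨Or.inl (h.imp fun a b hab => by omega),
        h.imp fun a b hab => by
          rcases abs_cases (a - b) with ⟨he, _⟩ | ⟨he, _⟩ <;> omega⟩
    · exact ⟨Or.inr (h.imp fun a b hab => by omega),
        h.imp fun a b hab => by
          rcases abs_cases (a - b) with ⟨he, _⟩ | ⟨he, _⟩ <;> omega⟩

lemma pvFold_eq (l : List String) (acc : Int) :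
    (l.map pvParseLine).foldl
      (fun result line =>
        if (pvIsIncreasing line || pvIsDecreasing line) && pvSafeDifference line then result + 1
        else result) acc
    = l.foldl
      (fun total line =>
        let nums := (PySem.Str.split₀ line).map (fun x => (PySem.Int.ofStr? x).getD 0)
        let steps : PySem.Set Int :=
          PySem.Set.ofList ((nums.zip nums.tail).map (fun p => p.2 - p.1))
        total + (if pvSafeSteps.any (fun allowed => PySem.Set.issubset steps allowed) then 1 else 0))
      acc := by
  induction l generalizing acc with
  | nil => rfl
  | cons s t ih =>
    simp only [List.map_cons, List.foldl_cons]
    rw [show (if (pvIsIncreasing (pvParseLine s) || pvIsDecreasing (pvParseLine s))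
          && pvSafeDifference (pvParseLine s) then acc + 1 else acc)
        = acc + (if pvSafeSteps.any (fun allowed =>
            PySem.Set.issubset (PySem.Set.ofList
              (((pvParseLine s).zip (pvParseLine s).tail).map (fun p => p.2 - p.1))) allowed)
          then 1 else 0) by rw [pvCond_eq]; split <;> omega]
    exact ih _

-- ===== VERDICT (by name: the statement is the Claim_ definition above) =====
theorem part_one_spec : Claim_equal_part_one := by
  intro input_data _ _
  unfold Spec_part_one part_one part_one_alt
  exact pvFold_eq input_data 0
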